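-- pv_equiv track=rewrite | github.com/arek91w/colors | color.py | sort_back
-- ===== SOURCE A (Python) =====
-- def sort_back(s):
--     int_set = {'0', '1', '2', '3', '4', '5', '6', '7', '8', '9'}
--     new_s = s[-1]
--     for c in reversed(s[:-1]):
--         if c not in int_set:
--             break
--         new_s = c + new_s
--     return new_s
-- ===== SOURCE B (Python) =====
-- def sort_back(s):
--     last = s[-1]  # preserve IndexError on empty input, like the original
--     start = 0
--     for i in range(len(s) - 1):
--         if not ('0' <= s[i] <= '9'):
--             start = i + 1
--     return s[start:]
-- ===== Notes on version B (the rewrite author's own statement) =====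
-- stated objective: alternative
-- what changed: Replaces the backward char-by-char string prepending with a single forward pass that tracks the start index of the trailing digit run and returns one slice s[start:].
import Mathlib
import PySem

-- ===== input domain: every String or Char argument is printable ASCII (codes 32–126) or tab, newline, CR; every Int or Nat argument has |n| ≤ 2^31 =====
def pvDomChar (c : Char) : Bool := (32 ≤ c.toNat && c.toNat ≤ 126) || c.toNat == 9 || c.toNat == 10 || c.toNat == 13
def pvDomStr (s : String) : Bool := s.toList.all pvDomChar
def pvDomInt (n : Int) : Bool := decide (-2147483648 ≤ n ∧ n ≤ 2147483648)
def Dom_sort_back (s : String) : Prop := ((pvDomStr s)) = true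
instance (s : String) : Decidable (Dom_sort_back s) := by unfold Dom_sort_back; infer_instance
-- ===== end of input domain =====

-- B replaces A's backward char-by-char prepend with a single forward index-tracking pass
-- plus one final slice (objective: alternative decomposition, same result).

-- ===== PORT A =====
-- the literal set {'0',…,'9'} of A
def pvIntSet : PySem.Set Char :=
  PySem.Set.ofList ['0', '1', '2', '3', '4', '5', '6', '7', '8', '9']

-- A's loop over reversed(s[:-1]) with break, accumulating new_s
def sortBackLoopA : List Char → List Char → List Char
  | [], acc => acc
  | c :: rest, acc => if ¬ pvIntSet.contains c then acc else sortBackLoopA rest (c :: acc)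

def sort_back (s : String) : String :=
  match PySem.Str.pyGet? s (-1) with
  | none => ""   -- Python raises IndexError here (s = ""); excluded by Pre_
  | some c0 =>
      String.ofList
        (sortBackLoopA ((PySem.Str.slice s none (some (-1))).toList.reverse) [c0])

-- ===== PORT B =====
def sort_back_alt (s : String) : String :=
  match PySem.Str.pyGet? s (-1) with
  | none => ""   -- B also raises IndexError on "" (last = s[-1]); excluded by Pre_
  | some _last =>
      let start : Int :=
        (PySem.List.pyRange 0 (PySem.Str.len s - 1) 1).foldl
          (fun st i =>
            if ¬ PySem.Chars.isdigit (PySem.List.pyGetD s.toList i ' ') then i + 1 else st)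
          0
      PySem.Str.slice s (some start) none

-- ===== PRECONDITION & SPEC =====
-- Pre_ excludes only the empty string, on which both A and B raise IndexError.
def Pre_sort_back (s : String) : Prop := s ≠ ""
instance (s : String) : Decidable (Pre_sort_back s) := by unfold Pre_sort_back; infer_instance
def pvWitness_sort_back : String := "ab12c"

def Spec_sort_back (s : String) (out : String) : Prop := out = sort_back_alt s
instance (s : String) (out : String) : Decidable (Spec_sort_back s out) := by
  unfold Spec_sort_back; infer_instance

-- ===== CLAIM (what is proved, stated in full; the proofs are below) =====
def Claim_equal_sort_back : Prop :=
  ∀ (s : String), Dom_sort_back s → Pre_sort_back s → Spec_sort_back s (sort_back s)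

-- ===== LEMMAS AND PROOFS =====

-- A's set membership coincides with B's '0' <= c <= '9' test (= PySem.Chars.isdigit)
theorem pvContains_eq_isdigit (c : Char) :
    pvIntSet.contains c = PySem.Chars.isdigit c := by
  by_cases h : PySem.Chars.isdigit c = true
  · rw [h]
    have h1 : '0' ≤ c ∧ c ≤ '9' := by simpa [PySem.Chars.isdigit] using h
    have hb : 48 ≤ c.toNat ∧ c.toNat ≤ 57 := by
      obtain ⟨a, b⟩ := h1
      rw [Char.le_def, UInt32.le_iff_toNat_le] at a b
      exact ⟨a, b⟩
    obtain ⟨h48, h57⟩ := hb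
    rw [← Char.ofNat_toNat c]
    interval_cases h' : c.toNat <;> decide
  · rw [Bool.eq_false_iff.mpr h]
    by_contra hc
    have hc' : pvIntSet.contains c = true := by simpa using hc
    have hmem : c ∈ ['0', '1', '2', '3', '4', '5', '6', '7', '8', '9'] := by
      simpa [pvIntSet, PySem.Set.mem_ofList] using (PySem.Set.contains_iff _ _).mp hc'
    fin_cases hmem <;> exact absurd (by decide) h

-- A's loop result: the leading digit run of its (reversed) input, reversed, before acc
theorem sortBackLoopA_eq (r acc : List Char) :
    sortBackLoopA r acc = (r.takeWhile PySem.Chars.isdigit).reverse ++ acc := by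
  induction r generalizing acc with
  | nil => simp [sortBackLoopA]
  | cons c rest ih =>
      rw [sortBackLoopA, pvContains_eq_isdigit]
      by_cases h : PySem.Chars.isdigit c = true
      · simp [h, ih]
      · simp [Bool.eq_false_iff.mpr h]

-- length of the trailing digit run
def pvTdc (l : List Char) : Nat := (l.reverse.takeWhile PySem.Chars.isdigit).length

theorem pvTdc_le (l : List Char) : pvTdc l ≤ l.length := by
  have := List.Sublist.length_le
    (List.takeWhile_sublist (p := PySem.Chars.isdigit) (l := l.reverse))
  simpa [pvTdc] using this

theorem pvTdc_append (l : List Char) (a : Char) :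
    pvTdc (l ++ [a]) = if PySem.Chars.isdigit a then pvTdc l + 1 else 0 := by
  by_cases h : PySem.Chars.isdigit a = true <;>
    simp [pvTdc, h]

-- B's fold computes n - (trailing digit count of the first n chars)
theorem pvFoldB (l : List Char) (n : Nat) (hn : n ≤ l.length) :
    ((List.range n).foldl
      (fun st (k : Nat) =>
        if ¬ PySem.Chars.isdigit (l.getD k ' ') then (k : Int) + 1 else st) 0)
      = (n : Int) - pvTdc (l.take n) := by
  induction n with
  | zero => simp [pvTdc]
  | succ n ih =>
      have hn' : n ≤ l.length := by omega
      have hlt : n < l.length := by omega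
      have hget : l.getD n ' ' = l[n] := List.getD_eq_getElem l ' ' hlt
      have htake : l.take (n + 1) = l.take n ++ [l[n]] := by
        rw [List.take_add_one, List.getElem?_eq_getElem hlt]
        rfl
      rw [List.range_succ, List.foldl_append, ih hn', List.foldl_cons, List.foldl_nil,
        hget, htake, pvTdc_append]
      have hlen : (l.take n).length = n := by simp [hn']
      have h2 : pvTdc (l.take n) ≤ n := by
        have := pvTdc_le (l.take n); omega
      by_cases h : PySem.Chars.isdigit l[n] = true
      · rw [if_neg (by simp [h]), if_pos h]
        push_cast; omega
      · rw [if_pos (by simp [h]), if_neg h]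
        push_cast; omega

-- dropping everything before the trailing digit run
theorem pvDrop_td (m : List Char) (c : Char) :
    (m ++ [c]).drop (m.length - pvTdc m)
      = (m.reverse.takeWhile PySem.Chars.isdigit).reverse ++ [c] := by
  have hsplit : (m.reverse.dropWhile PySem.Chars.isdigit).reverse ++
      (m.reverse.takeWhile PySem.Chars.isdigit).reverse = m := by
    rw [← List.reverse_append,
      List.takeWhile_append_dropWhile (p := PySem.Chars.isdigit) (l := m.reverse),
      List.reverse_reverse]
  have hlen : (m.reverse.dropWhile PySem.Chars.isdigit).reverse.length
      = m.length - pvTdc m := by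
    have := congrArg List.length hsplit
    simp only [List.length_append, List.length_reverse] at this
    simp only [List.length_reverse, pvTdc]
    omega
  calc (m ++ [c]).drop (m.length - pvTdc m)
      = ((m.reverse.dropWhile PySem.Chars.isdigit).reverse ++
          ((m.reverse.takeWhile PySem.Chars.isdigit).reverse ++ [c])).drop
          (m.reverse.dropWhile PySem.Chars.isdigit).reverse.length := by
        rw [hlen, ← List.append_assoc, hsplit]
    _ = (m.reverse.takeWhile PySem.Chars.isdigit).reverse ++ [c] := List.drop_left

-- ===== VERDICT (by name: the statement is the Claim_ definition above) =====
theorem sort_back_spec : Claim_equal_sort_back := by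
  intro s _ hpre
  unfold Spec_sort_back
  have hnil : s.toList ≠ [] := by
    simpa [String.toList_eq_nil_iff] using hpre
  obtain ⟨m, c, hdec⟩ : ∃ m c, s.toList = m ++ [c] :=
    ⟨_, _, (List.dropLast_append_getLast hnil).symm⟩
  have hget : PySem.Str.pyGet? s (-1) = some c := by
    rw [show PySem.Str.pyGet? s (-1) = PySem.List.pyGet? s.toList (-1) from rfl,
      hdec, PySem.List.pyGet?_neg_one_append_singleton]
  -- A's value
  have hslice : (PySem.Str.slice s none (some (-1))).toList.reverse = m.reverse := by
    rw [PySem.Str.slice_to_neg_one, hdec]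
    simp
  have hA : sort_back s = String.ofList (sortBackLoopA m.reverse [c]) := by
    unfold sort_back
    rw [hget, hslice]
  -- B's value
  have hlenl : s.toList.length = m.length + 1 := by rw [hdec]; simp
  have hlen : PySem.Str.len s - 1 = ((m.length : Nat) : Int) := by
    rw [PySem.Str.len_eq, hlenl]; push_cast; ring
  have hfold :
      ((PySem.List.pyRange 0 (PySem.Str.len s - 1) 1).foldl
        (fun st i =>
          if ¬ PySem.Chars.isdigit (PySem.List.pyGetD s.toList i ' ') then i + 1 else st) 0)
      = (m.length : Int) - pvTdc m := by
    rw [hlen, PySem.List.pyRange_zero_natCast, List.foldl_map]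
    have hfun : ∀ (st : Int) (k : Nat),
        (if ¬ PySem.Chars.isdigit (PySem.List.pyGetD s.toList (k : Int) ' ')
          then (k : Int) + 1 else st)
        = (if ¬ PySem.Chars.isdigit (s.toList.getD k ' ') then (k : Int) + 1 else st) := by
      intro st k
      rw [PySem.List.pyGetD_natCast]
    simp only [hfun]
    rw [pvFoldB s.toList m.length (by omega)]
    congr 2
    rw [hdec, List.take_left]
  have hB : sort_back_alt s
      = PySem.Str.slice s (some ((m.length : Int) - pvTdc m)) none := by
    unfold sort_back_alt
    rw [hget, hfold]
  -- equate the two strings via their character lists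
  apply String.toList_inj.mp
  rw [hA, hB, String.toList_ofList, sortBackLoopA_eq]
  have hstart : ((m.length : Int) - pvTdc m) = (((m.length - pvTdc m : Nat)) : Int) := by
    have := pvTdc_le m
    omega
  have hBlist : (PySem.Str.slice s (some ((m.length : Int) - pvTdc m)) none).toList
      = s.toList.drop (m.length - pvTdc m) := by
    rw [hstart]
    simp [PySem.Str.slice, PySem.List.slice_from_natCast]
  rw [hBlist, hdec, pvDrop_td]
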